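-- pv_equiv track=rewrite | github.com/Maerig/advent_of_code_2020 | day14/day14.py | floating_variations
-- ===== SOURCE A (Python) =====
-- def floating_variations(bitmask):
--     variation_stack = [bitmask]
--     while variation_stack:
--         variation = variation_stack.pop()
--         try:
--             x_idx = variation.index("X")
--         except ValueError:
--             # No more X
--             yield variation
--             continue
--
--         variation_stack.append(variation[:x_idx] + "0" + variation[x_idx + 1:])
--         variation_stack.append(variation[:x_idx] + "1" + variation[x_idx + 1:])
-- ===== SOURCE B (Python) =====
-- def floating_variations(bitmask):
--     # Counting formulation: enumerate n in [0, 2**k); bit (k-1-t) of n chooses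
--     # digit for the t-th X ('1' for bit 0, '0' for bit 1), matching A's order.
--     k = bitmask.count("X")
--     for n in range(2 ** k):
--         out = []
--         j = k
--         for c in bitmask:
--             if c == "X":
--                 j -= 1
--                 out.append("0" if (n >> j) & 1 else "1")
--             else:
--                 out.append(c)
--         yield "".join(out)
-- ===== Notes on version B (the rewrite author's own statement) =====
-- stated objective: alternative
-- what changed: Replaces A's explicit work-stack DFS (repeated .index scans and branching pushes) by a direct counting enumeration: n runs over range(2**k) and bit (k-1-t) of n picks the digit for the t-th X in one pass over the mask.
import Mathlib
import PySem

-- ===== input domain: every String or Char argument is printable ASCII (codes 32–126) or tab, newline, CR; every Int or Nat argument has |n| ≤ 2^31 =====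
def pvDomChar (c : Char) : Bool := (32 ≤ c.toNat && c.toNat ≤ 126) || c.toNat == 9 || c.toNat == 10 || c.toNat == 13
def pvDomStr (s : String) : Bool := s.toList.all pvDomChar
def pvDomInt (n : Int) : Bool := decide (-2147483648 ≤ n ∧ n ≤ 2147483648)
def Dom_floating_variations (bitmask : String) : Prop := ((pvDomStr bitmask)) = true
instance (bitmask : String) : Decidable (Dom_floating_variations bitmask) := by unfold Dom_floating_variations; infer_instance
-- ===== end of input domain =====

-- B replaces A's explicit work-stack DFS by a counting enumeration over range(2**k); alternative formulation, same cost.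

-- ===== PORT A =====
-- variation.index("X") under try/except: some i = first index of 'X', none = ValueError
def idxX : List Char → Option Nat
  | [] => none
  | c :: cs => if c = 'X' then some 0 else (idxX cs).map (· + 1)

theorem idxX_decompose {v : List Char} {i : Nat} (h : idxX v = some i) :
    v.take i ++ 'X' :: v.drop (i+1) = v ∧ 'X' ∉ v.take i := by
  induction v generalizing i with
  | nil => simp [idxX] at h
  | cons c cs ih =>
    by_cases hc : c = 'X'
    · simp [idxX, hc] at h
      subst h; simp [hc]
    · simp [idxX, hc] at h
      obtain ⟨j, hj, rfl⟩ := h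
      obtain ⟨h1, h2⟩ := ih hj
      constructor
      · simpa [List.take, List.drop] using h1
      · simp [List.take, h2, Ne.symm hc]

theorem countX_of_idxX_some {v : List Char} {i : Nat} (h : idxX v = some i) :
    v.count 'X' = (v.take i ++ c :: v.drop (i+1)).count 'X' + (if c = 'X' then 0 else 1) := by
  obtain ⟨h1, h2⟩ := idxX_decompose h
  conv_lhs => rw [← h1]
  simp [List.count_append]
  split_ifs with hc <;> simp [hc]
  omega

-- the while-loop over the variation stack (list head = top of stack)
def goA : List (List Char) → List (List Char)
  | [] => []
  | v :: rest =>
    match h : idxX v with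
    | none => v :: goA rest
    | some i =>
      goA ((v.take i ++ '1' :: v.drop (i+1)) :: (v.take i ++ '0' :: v.drop (i+1)) :: rest)
termination_by stack => (stack.map (fun v => 3 ^ (v.count 'X'))).sum
decreasing_by
  · -- 'yield' branch: the head is removed
    simp [List.map, List.sum_cons]
  · -- split branch: 3^(m+1) is replaced by 2 * 3^m
    have h1 := countX_of_idxX_some (c := '1') h
    simp at h1
    simp [List.map, List.sum_cons]
    have hpos : 0 < 3 ^ ((v.take i).count 'X' + (v.drop (i+1)).count 'X') :=
      Nat.pow_pos (by norm_num)
    rw [h1, pow_succ]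
    omega

def floating_variations (bitmask : String) : List String :=
  (goA [bitmask.toList]).map String.ofList

-- ===== PORT B =====
-- the inner loop of B: j counts remaining X's; at each X, j -= 1 then bit (n >> j) & 1 picks the digit
def fillB (n : Nat) : Nat → List Char → List Char
  | _, [] => []
  | j, c :: cs =>
    if c = 'X' then (if (n >>> (j - 1)) &&& 1 = 1 then '0' else '1') :: fillB n (j - 1) cs
    else c :: fillB n j cs

def floating_variations_alt (bitmask : String) : List String :=
  let s := bitmask.toList
  let k := s.count 'X'
  -- range(2**k): nonnegative, exact as List.range over Nat
  (List.range (2 ^ k)).map (fun n => String.ofList (fillB n k s))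

-- ===== PRECONDITION & SPEC =====
def Spec_floating_variations (bitmask : String) (out : List String) : Prop := out = floating_variations_alt bitmask
instance (bitmask : String) (out : List String) : Decidable (Spec_floating_variations bitmask out) := by unfold Spec_floating_variations; infer_instance

-- ===== CLAIM (what is proved, stated in full; the proofs are below) =====
def Claim_equal_floating_variations : Prop := ∀ (bitmask : String), Dom_floating_variations bitmask → Spec_floating_variations bitmask (floating_variations bitmask)

-- ===== LEMMAS AND PROOFS =====

def expandB (v : List Char) : List (List Char) :=
  (List.range (2 ^ (v.count 'X'))).map (fun n => fillB n (v.count 'X') v)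

theorem idxX_none_notMem {v : List Char} (h : idxX v = none) : 'X' ∉ v := by
  induction v with
  | nil => simp
  | cons c cs ih =>
    by_cases hc : c = 'X'
    · simp [idxX, hc] at h
    · simp [idxX, hc] at h
      simp [Ne.symm hc, ih h]

theorem fillB_noX {v : List Char} (hn : 'X' ∉ v) (n j : Nat) : fillB n j v = v := by
  induction v generalizing j with
  | nil => rfl
  | cons c cs ih =>
    simp at hn
    simp [fillB, Ne.symm hn.1, ih hn.2]

theorem fillB_append_noX {p : List Char} (hp : 'X' ∉ p) (cs : List Char) (n j : Nat) :
    fillB n j (p ++ cs) = p ++ fillB n j cs := by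
  induction p with
  | nil => rfl
  | cons c cs' ih =>
    simp at hp
    simp [fillB, Ne.symm hp.1, ih hp.2]

theorem fillB_mod {cs : List Char} {n n' j : Nat} (hj : cs.count 'X' ≤ j)
    (hmod : n % 2 ^ j = n' % 2 ^ j) : fillB n j cs = fillB n' j cs := by
  induction cs generalizing j n n' with
  | nil => rfl
  | cons c cs ih =>
    by_cases hc : c = 'X'
    · subst hc
      simp at hj
      have hj1 : 1 ≤ j := by omega
      have hbit : (n >>> (j-1)) &&& 1 = (n' >>> (j-1)) &&& 1 := by
        have h1 : (n >>> (j-1)) &&& 1 = (if n.testBit (j-1) then 1 else 0) := by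
          simp [Nat.testBit, Nat.and_one_is_mod]
          rcases Nat.mod_two_eq_zero_or_one (n >>> (j-1)) with h | h <;> simp [h]
        have h2 : (n' >>> (j-1)) &&& 1 = (if n'.testBit (j-1) then 1 else 0) := by
          simp [Nat.testBit, Nat.and_one_is_mod]
          rcases Nat.mod_two_eq_zero_or_one (n' >>> (j-1)) with h | h <;> simp [h]
        have ht : n.testBit (j-1) = n'.testBit (j-1) := by
          have e1 : (n % 2 ^ j).testBit (j-1) = n.testBit (j-1) := by
            simp [Nat.testBit_mod_two_pow]; omega
          have e2 : (n' % 2 ^ j).testBit (j-1) = n'.testBit (j-1) := by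
            simp [Nat.testBit_mod_two_pow]; omega
          rw [← e1, ← e2, hmod]
        rw [h1, h2, ht]
      have hrec : fillB n (j-1) cs = fillB n' (j-1) cs := by
        apply ih (by omega)
        have hd : (2:Nat) ^ (j-1) ∣ 2 ^ j := pow_dvd_pow 2 (by omega)
        calc n % 2 ^ (j-1) = n % 2 ^ j % 2 ^ (j-1) := (Nat.mod_mod_of_dvd n hd).symm
          _ = n' % 2 ^ j % 2 ^ (j-1) := by rw [hmod]
          _ = n' % 2 ^ (j-1) := Nat.mod_mod_of_dvd n' hd
      simp [fillB, hbit, hrec]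
    · simp [hc] at hj
      simp only [fillB, if_neg hc]
      rw [ih hj hmod]

-- splitting lemma: expanding at the first X gives the '1'-branch block then the '0'-branch block
theorem expandB_split_pq (p q : List Char) (hp : 'X' ∉ p) :
    expandB (p ++ 'X' :: q) = expandB (p ++ '1' :: q) ++ expandB (p ++ '0' :: q) := by
  have hpX : p.count 'X' = 0 := List.count_eq_zero.mpr hp
  have hcv : (p ++ 'X' :: q).count 'X' = q.count 'X' + 1 := by simp [List.count_append, hpX]
  have hc1 : (p ++ '1' :: q).count 'X' = q.count 'X' := by simp [List.count_append, hpX]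
  have hc0 : (p ++ '0' :: q).count 'X' = q.count 'X' := by simp [List.count_append, hpX]
  unfold expandB
  rw [hcv, hc1, hc0]
  have hsplit : (2:Nat) ^ (q.count 'X' + 1) = 2 ^ q.count 'X' + 2 ^ q.count 'X' := by ring
  rw [hsplit, List.range_add, List.map_append, List.map_map]
  congr 1
  · -- n < 2^m : bit m is 0, digit '1'
    apply List.map_congr_left
    intro n hn
    simp only [List.mem_range] at hn
    have hbit : (n >>> q.count 'X') &&& 1 = 0 := by
      rw [Nat.shiftRight_eq_div_pow, Nat.div_eq_of_lt hn]
      rfl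
    rw [fillB_append_noX hp, fillB_append_noX hp]
    simp [fillB, hbit]
  · -- n = 2^m + n' : bit m is 1, digit '0', remaining bits those of n'
    apply List.map_congr_left
    intro n hn
    simp only [List.mem_range] at hn
    simp only [Function.comp_apply]
    have hbit : ((2 ^ q.count 'X' + n) >>> q.count 'X') &&& 1 = 1 := by
      rw [Nat.shiftRight_eq_div_pow, Nat.add_div_left _ (Nat.pow_pos (by norm_num)),
        Nat.div_eq_of_lt hn]
      rfl
    have hrest : fillB (2 ^ q.count 'X' + n) (q.count 'X') q = fillB n (q.count 'X') q :=
      fillB_mod le_rfl (by rw [Nat.add_mod_left])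
    rw [fillB_append_noX hp, fillB_append_noX hp]
    simp [fillB, hbit, hrest]

theorem expandB_split {v : List Char} {i : Nat} (h : idxX v = some i) :
    expandB v = expandB (v.take i ++ '1' :: v.drop (i+1)) ++ expandB (v.take i ++ '0' :: v.drop (i+1)) := by
  obtain ⟨hv, hp⟩ := idxX_decompose h
  conv_lhs => rw [← hv]
  exact expandB_split_pq _ _ hp

theorem goA_cons_none {v : List Char} {rest : List (List Char)} (h : idxX v = none) :
    goA (v :: rest) = v :: goA rest := by
  rw [goA]; split <;> simp_all

theorem goA_cons_some {v : List Char} {rest : List (List Char)} {i : Nat} (h : idxX v = some i) :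
    goA (v :: rest)
      = goA ((v.take i ++ '1' :: v.drop (i+1)) :: (v.take i ++ '0' :: v.drop (i+1)) :: rest) := by
  rw [goA]; split <;> simp_all

theorem goA_flatMap (stack : List (List Char)) : goA stack = stack.flatMap expandB := by
  induction stack using goA.induct with
  | case1 => simp [goA]
  | case2 v rest h ih =>
    have hX := idxX_none_notMem h
    have hc : v.count 'X' = 0 := List.count_eq_zero.mpr hX
    rw [goA_cons_none h]
    simp only [List.flatMap_cons, ih]
    simp [expandB, hc, List.range_one, fillB_noX hX]
  | case3 v rest i h ih =>
    rw [goA_cons_some h, ih]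
    simp only [List.flatMap_cons, ← List.append_assoc]
    congr 1
    exact (expandB_split h).symm

-- ===== VERDICT (by name: the statement is the Claim_ definition above) =====
theorem floating_variations_spec : Claim_equal_floating_variations := by
  intro bitmask _
  unfold Spec_floating_variations floating_variations floating_variations_alt
  rw [goA_flatMap]
  simp [expandB]
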